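-- pv_equiv track=rewrite | github.com/bikashghimire/python-leetcode | PattersInPython/excercise9.py | floyds_triangle
-- ===== SOURCE A (Python) =====
-- def floyds_triangle(n):
--     result = []
--     current_num = 1  # Start with the first natural number
--     for row in range(1, n + 1):  # For each row from 1 to n
--         # Generate a row with `row` numbers
--         current_row = " ".join(str(current_num + i) for i in range(row))
--         result.append(current_row)
--         current_num += row  # Update the starting number for the next row
--     return result
-- ===== SOURCE B (Python) =====
-- def floyds_triangle(n):
--     # Row r is computed independently by closed form: it holds the numbers
--     # r*(r-1)//2 + 1 .. r*(r+1)//2 (no running counter shared between rows).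
--     return [" ".join(map(str, range(r * (r - 1) // 2 + 1, r * (r + 1) // 2 + 1)))
--             for r in range(1, n + 1)]
-- ===== Notes on version B (the rewrite author's own statement) =====
-- stated objective: alternative
-- what changed: Each row is computed independently from the closed-form triangular-number bounds r*(r-1)//2+1 .. r*(r+1)//2, eliminating A's loop-carried current_num accumulator (rows no longer depend on previous iterations).
import Mathlib
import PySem

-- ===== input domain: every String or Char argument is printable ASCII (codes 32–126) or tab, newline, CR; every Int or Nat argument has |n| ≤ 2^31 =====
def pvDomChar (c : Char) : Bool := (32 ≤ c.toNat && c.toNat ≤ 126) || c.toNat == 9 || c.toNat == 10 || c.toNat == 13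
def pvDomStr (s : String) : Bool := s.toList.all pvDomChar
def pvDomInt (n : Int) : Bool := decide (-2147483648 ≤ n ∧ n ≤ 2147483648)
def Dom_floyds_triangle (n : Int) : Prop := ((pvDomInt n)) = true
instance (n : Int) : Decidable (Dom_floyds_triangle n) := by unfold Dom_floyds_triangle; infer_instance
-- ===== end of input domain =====

-- B computes each row independently from the closed-form triangular-number bounds,
-- eliminating A's loop-carried current_num accumulator (objective: alternative).

-- ===== PORT A =====
-- A: for row in range(1, n+1): join str(current_num + i) for i in range(row); current_num += row
def floyds_triangle (n : Int) : List String :=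
  ((PySem.List.pyRange 1 (n + 1) 1).foldl
    (fun (st : List String × Int) row =>
      (st.1 ++ [PySem.Str.join " " ((PySem.List.pyRange 0 row 1).map
          (fun i => PySem.Int.toStr (st.2 + i)))],
       st.2 + row))
    ([], 1)).1

-- ===== PORT B =====
-- B: row r is " ".join(map(str, range(r*(r-1)//2 + 1, r*(r+1)//2 + 1))), independent per row
def floyds_triangle_alt (n : Int) : List String :=
  (PySem.List.pyRange 1 (n + 1) 1).map (fun r =>
    PySem.Str.join " " ((PySem.List.pyRange
        (PySem.Int.floordiv (r * (r - 1)) 2 + 1)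
        (PySem.Int.floordiv (r * (r + 1)) 2 + 1) 1).map PySem.Int.toStr))

-- ===== PRECONDITION & SPEC =====
def Spec_floyds_triangle (n : Int) (out : List String) : Prop := out = floyds_triangle_alt n
instance (n : Int) (out : List String) : Decidable (Spec_floyds_triangle n out) := by unfold Spec_floyds_triangle; infer_instance

-- ===== CLAIM (what is proved, stated in full; the proofs are below) =====
def Claim_equal_floyds_triangle : Prop := ∀ (n : Int), Dom_floyds_triangle n → Spec_floyds_triangle n (floyds_triangle n)

-- ===== LEMMAS AND PROOFS =====

-- B's row of consecutive numbers from `cur` is A's row built as cur + i over range(r)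
lemma pv_row_eq (cur r : Int) :
    PySem.Str.join " " ((PySem.List.pyRange cur (cur + r) 1).map PySem.Int.toStr)
      = PySem.Str.join " " ((PySem.List.pyRange 0 r 1).map (fun i => PySem.Int.toStr (cur + i))) := by
  simp [PySem.List.pyRange_one, List.map_map, Function.comp_def]

-- closed form for the row start: with r = m+1 > 0, r*(r-1)//2 + 1 = m*(m+1)/2 + 1 (A's current_num)
lemma pv_start (m : Nat) :
    PySem.Int.floordiv (((m:Int) + 1) * (((m:Int) + 1) - 1)) 2 + 1
      = (m : Int) * ((m : Int) + 1) / 2 + 1 := by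
  rw [PySem.Int.floordiv_eq_ediv_of_pos (by omega)]
  ring_nf

-- closed form for the row end: r*(r+1)//2 + 1 = current_num + r
lemma pv_stop (m : Nat) :
    PySem.Int.floordiv (((m:Int) + 1) * (((m:Int) + 1) + 1)) 2 + 1
      = ((m : Int) * ((m : Int) + 1) / 2 + 1) + ((m:Int) + 1) := by
  rw [PySem.Int.floordiv_eq_ediv_of_pos (by omega)]
  have h2 : (2:Int) ∣ (m : Int) * ((m:Int) + 1) := (Int.even_mul_succ_self (m:Int)).two_dvd
  have h4 : ((m:Int) + 1) * (((m:Int) + 1) + 1) = (m:Int) * ((m:Int) + 1) + 2 * ((m:Int) + 1) := by ring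
  rw [h4]; omega

-- B appends its (m+1)-st row when n grows by one
lemma pv_alt_succ (m : Int) (hm : 0 ≤ m) :
    floyds_triangle_alt (m + 1)
      = floyds_triangle_alt m ++
        [PySem.Str.join " " ((PySem.List.pyRange
            (PySem.Int.floordiv ((m + 1) * ((m + 1) - 1)) 2 + 1)
            (PySem.Int.floordiv ((m + 1) * ((m + 1) + 1)) 2 + 1) 1).map PySem.Int.toStr)] := by
  unfold floyds_triangle_alt
  conv_lhs => rw [PySem.List.pyRange_one_succ_right (by omega : (1:Int) ≤ m + 1)]
  rw [List.map_append, List.map_singleton]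

-- loop invariant: A's fold over rows 1..m yields B's map, with current_num = m*(m+1)/2 + 1
lemma pv_fold (m : Nat) :
    (PySem.List.pyRange 1 ((m:Int) + 1) 1).foldl
      (fun (st : List String × Int) row =>
        (st.1 ++ [PySem.Str.join " " ((PySem.List.pyRange 0 row 1).map
            (fun i => PySem.Int.toStr (st.2 + i)))],
         st.2 + row))
      ([], 1)
    = (floyds_triangle_alt (m : Int), (m : Int) * ((m : Int) + 1) / 2 + 1) := by
  induction m with
  | zero =>
    simp [floyds_triangle_alt, PySem.List.pyRange_one_eq_nil]
  | succ k ih =>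
    push_cast
    rw [PySem.List.pyRange_one_succ_right (by omega : (1:Int) ≤ (k:Int) + 1),
      List.foldl_append, ih]
    simp only [List.foldl_cons, List.foldl_nil, Prod.mk.injEq]
    have h2 : (2:Int) ∣ (k : Int) * ((k:Int) + 1) := (Int.even_mul_succ_self (k:Int)).two_dvd
    have h4 : ((k:Int) + 1) * (((k:Int) + 1) + 1) = (k:Int) * ((k:Int) + 1) + 2 * ((k:Int) + 1) := by ring
    constructor
    · rw [pv_alt_succ (k:Int) (by omega), pv_start, pv_stop, pv_row_eq]
    · rw [h4]; omega

-- ===== VERDICT (by name: the statement is the Claim_ definition above) =====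
theorem floyds_triangle_spec : Claim_equal_floyds_triangle := by
  intro n _
  unfold Spec_floyds_triangle floyds_triangle
  by_cases hn : n ≤ 0
  · rw [PySem.List.pyRange_one_eq_nil (by omega)]
    unfold floyds_triangle_alt
    rw [PySem.List.pyRange_one_eq_nil (by omega)]
    rfl
  · obtain ⟨m, rfl⟩ := Int.eq_ofNat_of_zero_le (le_of_lt (by omega : (0:Int) < n))
    rw [pv_fold]
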